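-- pv_equiv track=rewrite | github.com/perrijuan/sockets-e-servidores- | socket_servidor1.py | word_to_hex
-- ===== SOURCE A (Python) =====
-- ascii_matrix = [
--     [
--         "NUL",
--         "SOH",
--         "STX",
--         "ETX",
--         "EOT",
--         "ENO",
--         "ACK",
--         "BEL",
--         "BS",
--         "TAB",
--         "LF",
--         "VT",
--         "FF",
--         "CR",
--         "SO",
--         "SI",
--     ],
--     [
--         "DLE",
--         "DC1",
--         "DC2",
--         "DC3",
--         "DC4",
--         "NAK",
--         "SYN",
--         "ETB",
--         "CAN",
--         "EM",
--         "SUB",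
--         "ESC",
--         "FS",
--         "GS",
--         "RS",
--         "US",
--     ],
--     [" ", "!", '"', "#", "$", "%", "&", "'", "(", ")", "*", "+", ",", "-", ".", "/"],
--     ["0", "1", "2", "3", "4", "5", "6", "7", "8", "9", ":", ";", "<", "=", ">", "?"],
--     ["@", "A", "B", "C", "D", "E", "F", "G", "H", "I", "J", "K", "L", "M", "N", "O"],
--     ["P", "Q", "R", "S", "T", "U", "V", "W", "X", "Y", "Z", "[", "\\", "]", "^", "_"],
--     ["`", "a", "b", "c", "d", "e", "f", "g", "h", "i", "j", "k", "l", "m", "n", "o"],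
--     ["p", "q", "r", "s", "t", "u", "v", "w", "x", "y", "z", "{", "|", "}", "~", "DEL"],
-- ]
--
-- def find_char_position(char):
--     for i, row in enumerate(ascii_matrix):
--         if char in row:
--             return i, row.index(char)
--     return None
--
-- def char_to_hex(char):
--     position = find_char_position(char)
--     if position:
--         row, col = position
--         hex_value = row * 16 + col
--         return f"{hex_value:02X}"
--     return None
--
-- def word_to_hex(word):
--     hex_values = []
--     for char in word:
--         hex_value = char_to_hex(char)
--         if hex_value:
--             hex_values.append(hex_value)
--         else:
--             hex_values.append("??")
--     return " ".join(hex_values)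
-- ===== SOURCE B (Python) =====
-- def word_to_hex(word):
--     return " ".join(
--         f"{ord(c):02X}" if 32 <= ord(c) <= 126 else "??"
--         for c in word
--     )
-- ===== Notes on version B (the rewrite author's own statement) =====
-- stated objective: simpler
-- what changed: Replaced the 8x16 ASCII lookup table and its row/column scanning helpers with direct arithmetic on ord(c): printable chars (codes 32..126) are formatted as two uppercase hex digits, any other char becomes '??'.
import Mathlib
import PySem

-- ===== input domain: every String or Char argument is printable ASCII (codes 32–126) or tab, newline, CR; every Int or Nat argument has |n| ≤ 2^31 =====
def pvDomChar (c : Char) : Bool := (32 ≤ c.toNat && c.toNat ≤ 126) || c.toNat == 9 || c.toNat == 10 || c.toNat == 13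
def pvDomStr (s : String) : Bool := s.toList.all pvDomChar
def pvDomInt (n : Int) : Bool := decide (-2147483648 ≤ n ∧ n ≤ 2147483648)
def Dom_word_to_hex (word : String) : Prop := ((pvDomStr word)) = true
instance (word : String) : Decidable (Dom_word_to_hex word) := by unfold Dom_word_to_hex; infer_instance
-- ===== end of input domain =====

-- B replaces A's 8×16 ASCII table and its scanning helpers by direct arithmetic on the char code (objective: simpler).

-- f"{v:02X}": two uppercase hex digits; exact for 0 ≤ v < 256 (all values both programs format)
def pvHexDigitU (n : Nat) : Char := if n < 10 then Char.ofNat (48 + n) else Char.ofNat (55 + n)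
def pvHex2 (v : Int) : String := String.ofList [pvHexDigitU (v.toNat / 16), pvHexDigitU (v.toNat % 16)]

-- ===== PORT A =====
def asciiMatrix : List (List String) :=
  [["NUL","SOH","STX","ETX","EOT","ENO","ACK","BEL","BS","TAB","LF","VT","FF","CR","SO","SI"],
   ["DLE","DC1","DC2","DC3","DC4","NAK","SYN","ETB","CAN","EM","SUB","ESC","FS","GS","RS","US"],
   [" ","!","\"","#","$","%","&","'","(",")","*","+",",","-",".","/"],
   ["0","1","2","3","4","5","6","7","8","9",":",";","<","=",">","?"],
   ["@","A","B","C","D","E","F","G","H","I","J","K","L","M","N","O"],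
   ["P","Q","R","S","T","U","V","W","X","Y","Z","[","\\","]","^","_"],
   ["`","a","b","c","d","e","f","g","h","i","j","k","l","m","n","o"],
   ["p","q","r","s","t","u","v","w","x","y","z","{","|","}","~","DEL"]]

def find_char_position_loop (ch : String) : List (Int × List String) → Option (Int × Int)
  | [] => none
  | (i, row) :: rest =>
      if ch ∈ row then
        -- row.index(char): guarded by the membership test, so index? is some here
        match PySem.List.index? row ch with
        | some j => some (i, (j : Int))
        | none => none
      else find_char_position_loop ch rest

def find_char_position (ch : String) : Option (Int × Int) :=
  find_char_position_loop ch (PySem.List.enumerate asciiMatrix)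

def char_to_hex (ch : String) : Option String :=
  match find_char_position ch with
  | some (row, col) => some (pvHex2 (row * 16 + col))   -- a (row, col) tuple is always truthy
  | none => none

def word_to_hex (word : String) : String :=
  PySem.Str.join " "
    (word.toList.foldl
      (fun acc c =>
        match char_to_hex (String.singleton c) with
        | some h => acc ++ [h]
        | none => acc ++ ["??"])
      [])

-- ===== PORT B =====
def word_to_hex_alt (word : String) : String :=
  PySem.Str.join " "
    (word.toList.map (fun c => if 32 ≤ c.toNat ∧ c.toNat ≤ 126 then pvHex2 (c.toNat : Int) else "??"))

-- ===== PRECONDITION & SPEC =====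
def Spec_word_to_hex (word : String) (out : String) : Prop := out = word_to_hex_alt word
instance (word : String) (out : String) : Decidable (Spec_word_to_hex word out) := by unfold Spec_word_to_hex; infer_instance

-- ===== CLAIM (what is proved, stated in full; the proofs are below) =====
def Claim_equal_word_to_hex : Prop := ∀ (word : String), Dom_word_to_hex word → Spec_word_to_hex word (word_to_hex word)

-- ===== LEMMAS AND PROOFS =====

-- what A's per-char branch computes, named so the fold can be rewritten to a map
def pvProcA (c : Char) : String :=
  match char_to_hex (String.singleton c) with
  | some h => h
  | none => "??"

def pvProcB (c : Char) : String :=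
  if 32 ≤ c.toNat ∧ c.toNat ≤ 126 then pvHex2 (c.toNat : Int) else "??"

lemma pvProcA_eq_procB_of_lt (n : Fin 128) :
    pvDomChar (Char.ofNat n) = true → pvProcA (Char.ofNat n) = pvProcB (Char.ofNat n) := by
  revert n; decide

lemma pvProcA_eq_procB (c : Char) (h : pvDomChar c = true) : pvProcA c = pvProcB c := by
  have hlt : c.toNat < 128 := by
    simp only [pvDomChar, Bool.or_eq_true, Bool.and_eq_true, decide_eq_true_eq, beq_iff_eq] at h
    omega
  have hc : Char.ofNat c.toNat = c := Char.ofNat_toNat c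
  have := pvProcA_eq_procB_of_lt ⟨c.toNat, hlt⟩ (by rw [hc]; exact h)
  rwa [hc] at this

-- ===== VERDICT (by name: the statement is the Claim_ definition above) =====
theorem word_to_hex_spec : Claim_equal_word_to_hex := by
  intro word hdom
  unfold Spec_word_to_hex word_to_hex word_to_hex_alt
  have hfold : (word.toList.foldl
      (fun acc c =>
        match char_to_hex (String.singleton c) with
        | some h => acc ++ [h]
        | none => acc ++ ["??"]) []) = word.toList.map pvProcA := by
    have h1 : (word.toList.foldl
        (fun acc c =>
          match char_to_hex (String.singleton c) with
          | some h => acc ++ [h]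
          | none => acc ++ ["??"]) []) = word.toList.foldl (fun acc c => acc ++ [pvProcA c]) [] := by
      apply PySem.List.foldl_congr_mem
      intro acc c _
      simp only [pvProcA]
      cases char_to_hex (String.singleton c) <;> rfl
    rw [h1]
    simpa using PySem.List.foldl_append_singleton_eq_map pvProcA word.toList []
  rw [hfold]
  congr 1
  have hall : ∀ c ∈ word.toList, pvDomChar c = true := by
    simpa [Dom_word_to_hex, pvDomStr, List.all_eq_true] using hdom
  exact List.map_congr_left (fun c hc => pvProcA_eq_procB c (hall c hc))
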